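-- pv_equiv track=rewrite | github.com/elhadiq/AgregationInfo | Algorithms/ShannonFano.py | compterOccurences
-- ===== SOURCE A (Python) =====
-- def compterOccurences(message):
--     #enlever les espaces
--     msg="".join(message.split(' '))
--     NbOccurences=dict()
--     for c in msg:
--         try:
--             NbOccurences[c]+=1
--         except:
--             NbOccurences[c]=1
--     return NbOccurences
-- ===== SOURCE B (Python) =====
-- def compterOccurences(message):
--     # remove the spaces, exactly as A does
--     msg = "".join(message.split(' '))
--     # stage 1: collect distinct characters in first-occurrence order
--     seen = []
--     for c in msg:
--         if c not in seen:
--             seen.append(c)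
--     # stage 2: one full scan per distinct character gives its count
--     return {c: msg.count(c) for c in seen}
-- ===== Notes on version B (the rewrite author's own statement) =====
-- stated objective: alternative
-- what changed: Replaces A's single-pass try/except running tally with a staged algorithm: first a pass collecting the distinct characters in first-occurrence order into a list, then a dict comprehension assigning each distinct character its count via a full msg.count scan.
import Mathlib
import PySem

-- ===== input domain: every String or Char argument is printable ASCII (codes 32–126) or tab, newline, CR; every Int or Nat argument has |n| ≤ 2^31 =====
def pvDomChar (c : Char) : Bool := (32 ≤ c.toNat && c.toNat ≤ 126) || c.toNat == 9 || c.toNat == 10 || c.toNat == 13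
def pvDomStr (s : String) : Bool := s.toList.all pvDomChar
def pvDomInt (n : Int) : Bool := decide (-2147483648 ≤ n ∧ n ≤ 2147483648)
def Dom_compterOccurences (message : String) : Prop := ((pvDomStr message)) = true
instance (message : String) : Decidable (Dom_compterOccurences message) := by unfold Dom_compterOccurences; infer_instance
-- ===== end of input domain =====

-- B replaces A's single-pass try/except running tally by a staged algorithm:
-- a first pass collects the distinct characters in first-occurrence order, a
-- dict comprehension then assigns each its count by a full scan.
-- Objective: alternative decomposition; same space stripping, same key order.

-- ===== PORT A =====
-- msg = "".join(message.split(' ')); then a running tally: try += 1 / except = 1.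
-- Dict keys are Python 1-char strings; the port keys the dict by Char and renders
-- each key as its 1-char String at the end (c ↦ String.ofList [c] is injective,
-- so insertion order and lookups coincide exactly).
def compterOccurences (message : String) : List (String × Int) :=
  let msg : List Char := PySem.Chars.join [] (PySem.Chars.splitOn message.toList [' '])
  let d : PySem.Dict Char Int := msg.foldl (fun d c =>
    match d.get? c with
    | some v => d.insert c (v + 1)   -- try: NbOccurences[c] += 1
    | none   => d.insert c 1)        -- except: NbOccurences[c] = 1
    PySem.Dict.empty
  d.items.map (fun p => (String.ofList [p.1], p.2))

-- ===== PORT B =====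
-- same stripping; seen = []; for c in msg: if c not in seen: seen.append(c)
-- (that loop is PySem.Set.add folded over msg); then {c: msg.count(c) for c in seen}:
-- seen has no duplicates, so the comprehension's items are exactly seen mapped to
-- (key, count) pairs in order.
def compterOccurences_alt (message : String) : List (String × Int) :=
  let msg : List Char := PySem.Chars.join [] (PySem.Chars.splitOn message.toList [' '])
  let seen : PySem.Set Char := msg.foldl PySem.Set.add PySem.Set.empty
  seen.map (fun c => (String.ofList [c], (msg.count c : Int)))

-- ===== PRECONDITION & SPEC =====
def Spec_compterOccurences (message : String) (out : List (String × Int)) : Prop := out = compterOccurences_alt message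
instance (message : String) (out : List (String × Int)) : Decidable (Spec_compterOccurences message out) := by unfold Spec_compterOccurences; infer_instance

-- ===== CLAIM =====
def Claim_equal_compterOccurences : Prop := ∀ (message : String), Dom_compterOccurences message → Spec_compterOccurences message (compterOccurences message)

-- ===== LEMMAS AND PROOFS =====

-- A's loop is the standard counter fold.
lemma afold_eq_counter (l : List Char) :
    l.foldl (fun d c =>
      match d.get? c with
      | some v => d.insert c (v + 1)
      | none   => d.insert c 1) (PySem.Dict.empty : PySem.Dict Char Int) = PySem.Dict.counter l := by
  have h : (fun (d : PySem.Dict Char Int) (c : Char) =>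
      match d.get? c with
      | some v => d.insert c (v + 1)
      | none   => d.insert c 1)
      = fun d c => d.insert c (d.getD c 0 + 1) := by
    funext d c
    cases hc : d.get? c <;> simp [PySem.Dict.getD, hc]
  rw [h, PySem.Dict.foldl_insert_getD_add_one_eq_counter]

-- ===== VERDICT =====
theorem compterOccurences_spec : Claim_equal_compterOccurences := by
  intro message _
  unfold Spec_compterOccurences compterOccurences compterOccurences_alt
  dsimp only
  set msg : List Char := PySem.Chars.join [] (PySem.Chars.splitOn message.toList [' ']) with hmsg
  rw [afold_eq_counter msg, PySem.Dict.items_counter,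
    show (PySem.Set.empty : PySem.Set Char) = [] from rfl,
    ← PySem.Set.ofList_eq_foldl, List.map_map]
  rfl
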